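-- pv_equiv track=rewrite | github.com/romeonoro/Linguagens-Formais-e-Automatos | Implementacao.py | afd_termina_com_101
-- ===== SOURCE A (Python) =====
-- def afd_termina_com_101(palavra):
--     estado = 'q0'
--
--     for simbolo in palavra:
--         if estado == 'q0':
--             if simbolo == '0':
--                 estado = 'q0'
--             elif simbolo == '1':
--                 estado = 'q1'
--         elif estado == 'q1':
--             if simbolo == '0':
--                 estado = 'q2'
--             elif simbolo == '1':
--                 estado = 'q1'
--         elif estado == 'q2':
--             if simbolo == '0':
--                 estado = 'q0'
--             elif simbolo == '1':
--                 estado = 'q3'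
--         elif estado == 'q3':
--             if simbolo == '0':
--                 estado = 'q2'
--             elif simbolo == '1':
--                 estado = 'q1'
--
--     return estado == 'q3'
-- ===== SOURCE B (Python) =====
-- def afd_termina_com_101(palavra):
--     window = []
--     for c in palavra:
--         if c == '0' or c == '1':
--             window = (window + [c])[-3:]
--     return window == ['1', '0', '1']
-- ===== Notes on version B (the rewrite author's own statement) =====
-- stated objective: simpler
-- what changed: Replaces the explicit four-state DFA transition table with a sliding window of the last three binary symbols, returning whether that window is ['1','0','1'].
import Mathlib
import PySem

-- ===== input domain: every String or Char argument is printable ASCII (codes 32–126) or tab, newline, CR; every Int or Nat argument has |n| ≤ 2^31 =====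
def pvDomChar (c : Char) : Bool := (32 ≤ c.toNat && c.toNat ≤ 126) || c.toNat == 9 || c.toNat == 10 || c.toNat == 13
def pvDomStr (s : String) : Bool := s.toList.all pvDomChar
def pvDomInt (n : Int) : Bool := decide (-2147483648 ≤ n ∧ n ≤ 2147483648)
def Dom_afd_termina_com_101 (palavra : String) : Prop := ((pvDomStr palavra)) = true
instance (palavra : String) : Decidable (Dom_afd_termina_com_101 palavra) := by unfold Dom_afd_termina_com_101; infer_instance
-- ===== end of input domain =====

-- B replaces the four-state DFA table with a sliding window of the last three binary symbols (simpler).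

-- ===== PORT A =====
-- one step of A's for-loop body: branch structure as in the Python
def pvStepA (estado : String) (simbolo : Char) : String :=
  if estado = "q0" then
    (if simbolo = '0' then "q0" else if simbolo = '1' then "q1" else estado)
  else if estado = "q1" then
    (if simbolo = '0' then "q2" else if simbolo = '1' then "q1" else estado)
  else if estado = "q2" then
    (if simbolo = '0' then "q0" else if simbolo = '1' then "q3" else estado)
  else if estado = "q3" then
    (if simbolo = '0' then "q2" else if simbolo = '1' then "q1" else estado)
  else estado

def afd_termina_com_101 (palavra : String) : Bool :=
  (palavra.toList.foldl pvStepA "q0") == "q3"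

-- ===== PORT B =====
-- one step of B's loop: window = (window + [c])[-3:] when c is binary; drop (len-3) is
-- exact for Python's [-3:] (shorter lists are kept whole)
def pvStepB (window : List Char) (c : Char) : List Char :=
  if c = '0' ∨ c = '1' then
    (window ++ [c]).drop ((window ++ [c]).length - 3)
  else window

def afd_termina_com_101_alt (palavra : String) : Bool :=
  (palavra.toList.foldl pvStepB []) == ['1', '0', '1']

-- ===== PRECONDITION & SPEC =====
def Spec_afd_termina_com_101 (palavra : String) (out : Bool) : Prop := out = afd_termina_com_101_alt palavra
instance (palavra : String) (out : Bool) : Decidable (Spec_afd_termina_com_101 palavra out) := by unfold Spec_afd_termina_com_101; infer_instance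

-- ===== CLAIM (what is proved, stated in full; the proofs are below) =====
def Claim_equal_afd_termina_com_101 : Prop := ∀ (palavra : String), Dom_afd_termina_com_101 palavra → Spec_afd_termina_com_101 palavra (afd_termina_com_101 palavra)

-- ===== LEMMAS AND PROOFS =====

-- the reachable windows: all binary lists of length ≤ 3
def pvWS : List (List Char) :=
  [[], ['0'], ['1'],
   ['0','0'], ['0','1'], ['1','0'], ['1','1'],
   ['0','0','0'], ['0','0','1'], ['0','1','0'], ['0','1','1'],
   ['1','0','0'], ['1','0','1'], ['1','1','0'], ['1','1','1']]

-- the DFA state corresponding to a window of the last ≤3 binary symbols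
def pvStateOf (w : List Char) : String :=
  match w with
  | [] => "q0"
  | ['0'] => "q0" | ['1'] => "q1"
  | ['0','0'] => "q0" | ['0','1'] => "q1" | ['1','0'] => "q2" | ['1','1'] => "q1"
  | ['0','0','0'] => "q0" | ['1','0','0'] => "q0"
  | ['0','1','0'] => "q2" | ['1','1','0'] => "q2"
  | ['0','0','1'] => "q1" | ['0','1','1'] => "q1" | ['1','1','1'] => "q1"
  | ['1','0','1'] => "q3"
  | _ => "q0"

theorem pv_step (w : List Char) (hw : w ∈ pvWS) (c : Char) :
    pvStepB w c ∈ pvWS ∧ pvStepA (pvStateOf w) c = pvStateOf (pvStepB w c) := by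
  by_cases h0 : c = '0'
  · subst h0; fin_cases hw <;> decide
  · by_cases h1 : c = '1'
    · subst h1; fin_cases hw <;> decide
    · have hb : pvStepB w c = w := by simp [pvStepB, h0, h1]
      refine ⟨by rw [hb]; exact hw, ?_⟩
      rw [hb]
      fin_cases hw <;> simp [pvStepA, pvStateOf, h0, h1]

theorem pv_fold (l : List Char) (w : List Char) (hw : w ∈ pvWS) :
    l.foldl pvStepB w ∈ pvWS ∧
      l.foldl pvStepA (pvStateOf w) = pvStateOf (l.foldl pvStepB w) := by
  induction l generalizing w with
  | nil => exact ⟨hw, rfl⟩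
  | cons c l ih =>
    obtain ⟨h1, h2⟩ := pv_step w hw c
    simpa [List.foldl_cons, h2] using ih (pvStepB w c) h1

theorem pv_final (w : List Char) (hw : w ∈ pvWS) :
    (pvStateOf w == "q3") = (w == ['1','0','1']) := by
  fin_cases hw <;> decide

-- ===== VERDICT (by name: the statement is the Claim_ definition above) =====
theorem afd_termina_com_101_spec : Claim_equal_afd_termina_com_101 := by
  intro palavra _
  unfold Spec_afd_termina_com_101 afd_termina_com_101 afd_termina_com_101_alt
  obtain ⟨h1, h2⟩ := pv_fold palavra.toList [] (by decide)
  rw [show ("q0" : String) = pvStateOf [] from rfl, h2]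
  exact pv_final _ h1
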